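-- pv_equiv track=rewrite | github.com/andrej-a-tristan/virtualfr | backend/app/services/memory.py | _extract_emotions
-- ===== SOURCE A (Python) =====
-- EMOTION_KEYWORDS: dict[str, list[str]] = {
--     "stress": ["stressed", "stress", "anxious", "anxiety", "panic", "overwhelmed", "nervous", "worried"],
--     "sadness": ["sad", "down", "depressed", "lonely", "upset", "crying", "cry", "heartbroken"],
--     "anger": ["angry", "mad", "pissed", "furious", "annoyed", "frustrated"],
--     "affection": ["miss you", "love you", "❤️", "♥️", "xoxo", "hug", "hugs", "kiss", "kisses", "adore"],
--     "excitement": ["excited", "can't wait", "hyped", "thrilled", "amazing", "awesome"],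
--     "happiness": ["happy", "glad", "joyful", "cheerful", "great day", "good day"],
--     "fear": ["scared", "afraid", "terrified", "fearful", "frightened"],
-- }
--
-- EMOTION_VALENCE: dict[str, int] = {
--     "stress": -3,
--     "sadness": -4,
--     "anger": -3,
--     "fear": -3,
--     "affection": 4,
--     "excitement": 3,
--     "happiness": 4,
-- }
--
-- INTENSITY_BOOSTERS = ["really", "so", "extremely", "very", "super", "incredibly", "absolutely"]
--
-- def _extract_emotions(text: str) -> tuple[list[str], int, int]:
--     """
--     Extract emotions from text using keyword matching.
--     Returns: (emotion_tags, valence, intensity)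
--     """
--     lower = text.lower()
--     detected_emotions: list[str] = []
--
--     for emotion, keywords in EMOTION_KEYWORDS.items():
--         for kw in keywords:
--             if kw in lower:
--                 if emotion not in detected_emotions:
--                     detected_emotions.append(emotion)
--                 break
--
--     if not detected_emotions:
--         return [], 0, 0
--
--     # Calculate valence (average of detected emotions)
--     valence_sum = sum(EMOTION_VALENCE.get(e, 0) for e in detected_emotions)
--     valence = round(valence_sum / len(detected_emotions)) if detected_emotions else 0
--
--     # Calculate intensity
--     intensity = 3  # default
--     # Boost if intensity words present
--     if any(booster in lower for booster in INTENSITY_BOOSTERS):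
--         intensity = min(5, intensity + 1)
--     # Boost if multiple emotion keywords
--     keyword_count = sum(1 for e in detected_emotions for kw in EMOTION_KEYWORDS[e] if kw in lower)
--     if keyword_count >= 3:
--         intensity = min(5, intensity + 1)
--
--     return detected_emotions, valence, intensity
-- ===== SOURCE B (Python) =====
-- EMOTION_KEYWORDS: dict[str, list[str]] = {
--     "stress": ["stressed", "stress", "anxious", "anxiety", "panic", "overwhelmed", "nervous", "worried"],
--     "sadness": ["sad", "down", "depressed", "lonely", "upset", "crying", "cry", "heartbroken"],
--     "anger": ["angry", "mad", "pissed", "furious", "annoyed", "frustrated"],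
--     "affection": ["miss you", "love you", "❤️", "♥️", "xoxo", "hug", "hugs", "kiss", "kisses", "adore"],
--     "excitement": ["excited", "can't wait", "hyped", "thrilled", "amazing", "awesome"],
--     "happiness": ["happy", "glad", "joyful", "cheerful", "great day", "good day"],
--     "fear": ["scared", "afraid", "terrified", "fearful", "frightened"],
-- }
--
-- EMOTION_VALENCE: dict[str, int] = {
--     "stress": -3,
--     "sadness": -4,
--     "anger": -3,
--     "fear": -3,
--     "affection": 4,
--     "excitement": 3,
--     "happiness": 4,
-- }
--
-- INTENSITY_BOOSTERS = ["really", "so", "extremely", "very", "super", "incredibly", "absolutely"]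
--
--
-- def _extract_emotions(text: str) -> tuple[list[str], int, int]:
--     """One count-table pass over EMOTION_KEYWORDS; everything else is derived from it."""
--     lower = text.lower()
--     counts = {e: sum(kw in lower for kw in kws) for e, kws in EMOTION_KEYWORDS.items()}
--     detected = [e for e, c in counts.items() if c]
--     if not detected:
--         return [], 0, 0
--     valence = round(sum(EMOTION_VALENCE.get(e, 0) for e in detected) / len(detected))
--     intensity = 3
--     if any(b in lower for b in INTENSITY_BOOSTERS):
--         intensity += 1
--     if sum(counts.values()) >= 3:
--         intensity += 1
--     return detected, valence, min(intensity, 5)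
-- ===== Notes on version B (the rewrite author's own statement) =====
-- stated objective: simpler
-- what changed: B replaces A's break-early scan with membership test plus a second nested pass re-looking-up EMOTION_KEYWORDS[e] by a single count-table pass over EMOTION_KEYWORDS from which the detected list, the valence and the total keyword count are all derived.
import Mathlib
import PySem

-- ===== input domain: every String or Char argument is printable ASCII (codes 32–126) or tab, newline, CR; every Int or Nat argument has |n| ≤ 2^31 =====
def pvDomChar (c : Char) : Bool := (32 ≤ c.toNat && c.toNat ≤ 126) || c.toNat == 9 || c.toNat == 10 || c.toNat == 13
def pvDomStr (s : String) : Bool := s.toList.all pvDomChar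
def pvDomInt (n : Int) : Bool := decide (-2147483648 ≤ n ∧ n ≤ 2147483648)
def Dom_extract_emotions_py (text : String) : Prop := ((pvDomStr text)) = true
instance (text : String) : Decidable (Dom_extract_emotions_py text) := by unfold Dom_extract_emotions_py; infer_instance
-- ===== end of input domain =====

-- B replaces A's break-and-membership scan plus a second nested keyword pass with one
-- count-table pass over EMOTION_KEYWORDS from which detection, valence and the keyword
-- total are all derived (objective: simpler decomposition; same asymptotic cost).


-- shared module constants (EMOTION_KEYWORDS, EMOTION_VALENCE, INTENSITY_BOOSTERS)
def pvKW : PySem.Dict String (List String) := PySem.Dict.mk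
  [ ("stress", ["stressed", "stress", "anxious", "anxiety", "panic", "overwhelmed", "nervous", "worried"]),
    ("sadness", ["sad", "down", "depressed", "lonely", "upset", "crying", "cry", "heartbroken"]),
    ("anger", ["angry", "mad", "pissed", "furious", "annoyed", "frustrated"]),
    ("affection", ["miss you", "love you", "❤️", "♥️", "xoxo", "hug", "hugs", "kiss", "kisses", "adore"]),
    ("excitement", ["excited", "can't wait", "hyped", "thrilled", "amazing", "awesome"]),
    ("happiness", ["happy", "glad", "joyful", "cheerful", "great day", "good day"]),
    ("fear", ["scared", "afraid", "terrified", "fearful", "frightened"]) ]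

def pvVAL : PySem.Dict String Int := PySem.Dict.mk
  [ ("stress", -3), ("sadness", -4), ("anger", -3), ("fear", -3),
    ("affection", 4), ("excitement", 3), ("happiness", 4) ]

def pvBoosters : List String := ["really", "so", "extremely", "very", "super", "incredibly", "absolutely"]

-- round(a / b) for 0 < b, exact rational round-half-to-even; agrees with Python's float
-- round() here because every reachable valence_sum/len has an exactly representable half.
def pvRound (a b : Int) : Int :=
  let q := PySem.Int.floordiv a b
  let r := PySem.Int.mod a b
  if 2 * r < b then q
  else if b < 2 * r then q + 1
  else if PySem.Int.mod q 2 = 0 then q else q + 1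

-- ===== PORT A =====
-- inner 'for kw in keywords: if kw in lower: (append if new); break'
def pvDetectA (lower emotion : String) (acc : List String) : List String → List String
  | [] => acc
  | kw :: rest =>
      if PySem.Str.isIn kw lower then (if emotion ∈ acc then acc else acc ++ [emotion])
      else pvDetectA lower emotion acc rest

def extract_emotions_py (text : String) : List String × Int × Int :=
  let lower := PySem.Str.lower text
  let detected := pvKW.items.foldl (fun acc p => pvDetectA lower p.1 acc p.2) []
  if detected = [] then ([], 0, 0)
  else
    let vsum := detected.foldl (fun s e => s + pvVAL.getD e 0) 0
    let valence := if detected = [] then 0 else pvRound vsum (detected.length : Int)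
    let intensity : Int := 3
    let intensity := if pvBoosters.any (fun b => PySem.Str.isIn b lower) then min 5 (intensity + 1) else intensity
    -- EMOTION_KEYWORDS[e]: e is always a key here, so the KeyError branch is unreachable
    let kcount := detected.foldl (fun n e =>
        ((pvKW.get? e).getD []).foldl (fun n kw => if PySem.Str.isIn kw lower then n + 1 else n) n) (0 : Int)
    let intensity := if 3 ≤ kcount then min 5 (intensity + 1) else intensity
    (detected, valence, intensity)

-- ===== PORT B =====
def extract_emotions_py_alt (text : String) : List String × Int × Int :=
  let lower := PySem.Str.lower text
  let counts : List (String × Int) := pvKW.items.map (fun p =>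
      (p.1, p.2.foldl (fun n kw => n + (if PySem.Str.isIn kw lower then 1 else 0)) 0))
  let detected := (counts.filter (fun p => p.2 != 0)).map Prod.fst
  if detected = [] then ([], 0, 0)
  else
    let valence := pvRound (detected.foldl (fun s e => s + pvVAL.getD e 0) 0) (detected.length : Int)
    let intensity : Int := 3
    let intensity := if pvBoosters.any (fun b => PySem.Str.isIn b lower) then intensity + 1 else intensity
    let intensity := if 3 ≤ counts.foldl (fun s p => s + p.2) (0 : Int) then intensity + 1 else intensity
    (detected, valence, min intensity 5)

-- ===== PRECONDITION & SPEC =====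
def Spec_extract_emotions_py (text : String) (out : List String × Int × Int) : Prop := out = extract_emotions_py_alt text
instance (text : String) (out : List String × Int × Int) : Decidable (Spec_extract_emotions_py text out) := by unfold Spec_extract_emotions_py; infer_instance

-- ===== CLAIM (what is proved, stated in full; the proofs are below) =====
def Claim_equal_extract_emotions_py : Prop := ∀ (text : String), Dom_extract_emotions_py text → Spec_extract_emotions_py text (extract_emotions_py text)

-- ===== LEMMAS AND PROOFS =====

-- count ≠ 0 ↔ some element satisfies q
theorem pvCountP_ne_zero_iff {α : Type} (q : α → Bool) (l : List α) :
    (l.countP q ≠ 0) ↔ l.any q = true := by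
  rw [Ne, List.countP_eq_zero]; simp [List.any_eq_true]

-- B's running count of matches is countP
theorem pvCnt_eq (q : String → Bool) (l : List String) :
    l.foldl (fun n kw => n + (if q kw then 1 else 0)) (0 : Int) = (l.countP q : Int) := by
  rw [PySem.List.foldl_add l (fun kw => if q kw then 1 else 0) 0,
    PySem.List.sum_map_ite_one_zero]; ring

-- A's inner break-loop detects an emotion iff some keyword is a substring
theorem pvDetectA_eq (lower e : String) (acc : List String) (kws : List String) :
    pvDetectA lower e acc kws =
      if kws.any (fun kw => PySem.Str.isIn kw lower) then (if e ∈ acc then acc else acc ++ [e]) else acc := by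
  induction kws with
  | nil => rfl
  | cons kw rest ih =>
      rw [pvDetectA, ih, List.any_cons]
      by_cases h : PySem.Str.isIn kw lower = true
      · rw [if_pos h, h, Bool.true_or, if_pos rfl]
      · rw [if_neg h, Bool.eq_false_iff.mpr h, Bool.false_or]

-- A's detection fold over a table with fresh, distinct keys appends exactly the matching keys
theorem pvDetected_eq (q : List String → Bool) :
    ∀ (l : List (String × List String)) (acc : List String),
      (l.map Prod.fst).Nodup → (∀ e ∈ acc, e ∉ l.map Prod.fst) →
      l.foldl (fun acc p => if q p.2 then (if p.1 ∈ acc then acc else acc ++ [p.1]) else acc) acc =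
        acc ++ (l.filter (fun p => q p.2)).map Prod.fst := by
  intro l
  induction l with
  | nil => intro acc _ _; simp
  | cons p rest ih =>
      intro acc hnd hacc
      simp only [List.map_cons, List.nodup_cons] at hnd
      have hp : p.1 ∉ acc := fun h => (hacc _ h) (by simp)
      rw [List.foldl_cons, List.filter_cons]
      by_cases hq : q p.2 = true
      · have hfresh : ∀ e ∈ acc ++ [p.1], e ∉ rest.map Prod.fst := by
          intro e he
          rcases List.mem_append.mp he with h | h
          · exact fun hm => (hacc _ h) (by simp [hm])
          · simp at h; subst h; exact hnd.1
        rw [if_pos hq, if_neg hp, ih (acc ++ [p.1]) hnd.2 hfresh, if_pos hq]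
        simp
      · rw [if_neg hq, ih acc hnd.2 (fun e he hm => (hacc _ he) (by simp [hm])), if_neg hq]

-- B's count table detects the same emotions: count ≠ 0 ↔ some keyword matches
theorem pvDetectedB_eq (q : String → Bool) (l : List (String × List String)) :
    ((l.map (fun p => (p.1, p.2.foldl (fun n kw => n + (if q kw then 1 else 0)) (0 : Int)))).filter
        (fun p => p.2 != 0)).map Prod.fst =
      (l.filter (fun p => p.2.any q)).map Prod.fst := by
  induction l with
  | nil => rfl
  | cons p rest ih =>
      simp only [pvCnt_eq] at ih ⊢
      by_cases hany : p.2.any q = true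
      · have hne : p.2.countP q ≠ 0 := (pvCountP_ne_zero_iff q p.2).mpr hany
        simp [hany, hne, ih]
      · have hz : p.2.countP q = 0 :=
          List.countP_eq_zero.mpr (by simpa [List.any_eq_true] using hany)
        simp [hany, hz, ih]

-- A's second pass (lookup per detected emotion) sums the per-entry match counts
theorem pvKcA_eq (q : String → Bool) :
    ∀ (l : List (String × List String)) (a : Int),
      (∀ p ∈ l, pvKW.get? p.1 = some p.2) →
      (l.map Prod.fst).foldl (fun n e =>
          ((pvKW.get? e).getD []).foldl (fun n kw => if q kw then n + 1 else n) n) a =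
        a + (l.map (fun p => (p.2.countP q : Int))).sum := by
  intro l
  induction l with
  | nil => intro a _; simp
  | cons p rest ih =>
      intro a h
      simp only [List.map_cons, List.foldl_cons, h p (by simp), Option.getD_some]
      rw [PySem.List.foldl_if_add_one q p.2 a, ih _ (fun r hr => h r (by simp [hr])),
        List.sum_cons]
      ring

-- B's total of the count table equals the same sum, taken over ALL entries
theorem pvKcB_eq (q : String → Bool) (l : List (String × List String)) :
    (l.map (fun p => (p.1, p.2.foldl (fun n kw => n + (if q kw then 1 else 0)) (0 : Int)))).foldl
        (fun s p => s + p.2) 0 =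
      (l.map (fun p => (p.2.countP q : Int))).sum := by
  rw [PySem.List.foldl_add _ (fun p : String × Int => p.2) 0]
  simp [List.map_map, Function.comp_def, pvCnt_eq]

-- dropping the unmatched entries does not change the sum (their count is 0)
theorem pvSum_filter_eq (q : String → Bool) (l : List (String × List String)) :
    ((l.filter (fun p => p.2.any q)).map (fun p => (p.2.countP q : Int))).sum =
      (l.map (fun p => (p.2.countP q : Int))).sum := by
  induction l with
  | nil => rfl
  | cons p rest ih =>
      rw [List.filter_cons, List.map_cons, List.sum_cons]
      by_cases hany : p.2.any q = true
      · rw [if_pos hany, List.map_cons, List.sum_cons, ih]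
      · have hz : p.2.countP q = 0 :=
          List.countP_eq_zero.mpr (by simpa [List.any_eq_true] using hany)
        rw [if_neg hany, ih, hz]
        simp

-- ===== VERDICT (by name: the statement is the Claim_ definition above) =====
theorem extract_emotions_py_spec : Claim_equal_extract_emotions_py := by
  intro text _
  unfold Spec_extract_emotions_py extract_emotions_py extract_emotions_py_alt
  dsimp only
  have hnodup : (pvKW.items.map Prod.fst).Nodup := by decide
  have hdetA : pvKW.items.foldl (fun acc p => pvDetectA (PySem.Str.lower text) p.1 acc p.2) [] =
      (pvKW.items.filter (fun p => p.2.any (fun kw => PySem.Str.isIn kw (PySem.Str.lower text)))).map Prod.fst := by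
    have h2 := pvDetected_eq (fun kws => kws.any (fun kw => PySem.Str.isIn kw (PySem.Str.lower text)))
      pvKW.items [] hnodup (by simp)
    simp only [pvDetectA_eq]
    simpa using h2
  have hget : ∀ p ∈ pvKW.items.filter
      (fun p => p.2.any (fun kw => PySem.Str.isIn kw (PySem.Str.lower text))),
      pvKW.get? p.1 = some p.2 := by
    intro p hp
    exact PySem.Dict.get?_of_mem_items pvKW
      (by rcases p with ⟨k, v⟩; exact List.mem_of_mem_filter hp) (by decide)
  have hdetB := pvDetectedB_eq (fun kw => PySem.Str.isIn kw (PySem.Str.lower text)) pvKW.items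
  rw [hdetA, hdetB]
  by_cases hempty : (pvKW.items.filter
      (fun p => p.2.any (fun kw => PySem.Str.isIn kw (PySem.Str.lower text)))).map Prod.fst = []
  · rw [if_pos hempty, if_pos hempty]
  · have hkcA : ((pvKW.items.filter
        (fun p => p.2.any (fun kw => PySem.Str.isIn kw (PySem.Str.lower text)))).map Prod.fst).foldl
          (fun n e => ((pvKW.get? e).getD []).foldl
            (fun n kw => if PySem.Str.isIn kw (PySem.Str.lower text) then n + 1 else n) n) (0 : Int) =
        (pvKW.items.map (fun p =>
          (p.2.countP (fun kw => PySem.Str.isIn kw (PySem.Str.lower text)) : Int))).sum := by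
      rw [pvKcA_eq (fun kw => PySem.Str.isIn kw (PySem.Str.lower text)) _ _ hget, zero_add,
        pvSum_filter_eq]
    have hkcB := pvKcB_eq (fun kw => PySem.Str.isIn kw (PySem.Str.lower text)) pvKW.items
    rw [if_neg hempty, if_neg hempty, if_neg hempty, hkcA, hkcB]
    generalize (pvKW.items.map (fun p =>
        (p.2.countP (fun kw => PySem.Str.isIn kw (PySem.Str.lower text)) : Int))).sum = S
    generalize (pvBoosters.any fun b => PySem.Str.isIn b (PySem.Str.lower text)) = Bv
    cases Bv <;> by_cases hs : (3 : Int) ≤ S <;> simp [hs]
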